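-- pv_equiv track=rewrite | github.com/bashbash96/InterviewPreparation | Cracking The Coding Interview/Hard.py | min_undefined_chars
-- ===== SOURCE A (Python) =====
-- def min_undefined_chars(s, i, words, memo):
--     if i >= len(s):
--         return 0, ''
--
--     if s[i:] in words:
--         return 0, s[i:]
--
--     if i in memo:
--         return memo[i]
--
--     curr, curr_str = min_undefined_chars(s, i + 1, words, memo)
--     curr += 1
--     curr_str = s[i] + curr_str
--     for end in range(i + 1, len(s) + 1):
--         if s[i:end] in words:
--             count, string = min_undefined_chars(s, end, words, memo)
--             if count < curr:
--                 curr = count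
--                 curr_str = ' ' + s[i:end] + ' ' + string
--
--     memo[i] = curr, curr_str
--
--     return memo[i]
-- ===== SOURCE B (Python) =====
-- def min_undefined_chars(s, i, words, memo):
--     n = len(s)
--     if i >= n:
--         return 0, ''
--     wordset = set(words)
--     suf0 = s[i:]
--     if suf0 in wordset:
--         return 0, suf0
--     if i in memo:
--         return memo[i]
--     lens = sorted({len(w) for w in words if w})
--     dp = {n: (0, '')}
--     for j in range(n - 1, i - 1, -1):
--         suf = s[j:]
--         if suf in wordset:
--             dp[j] = (0, suf)
--             continue
--         if j in memo:
--             dp[j] = memo[j]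
--             continue
--         c0, st0 = dp[j + 1]
--         best = (c0 + 1, s[j] + st0)
--         for L in lens:
--             e = j + L
--             if e <= n:
--                 sub = s[j:e]
--                 if sub in wordset:
--                     c, st = dp[e]
--                     if c < best[0]:
--                         best = (c, ' ' + sub + ' ' + st)
--         dp[j] = best
--     return dp[i]
-- ===== Notes on version B (the rewrite author's own statement) =====
-- stated objective: alternative
-- what changed: Replaces the top-down memoized recursion that, at every index, scans all n end positions and tests each substring against the word list by a bottom-up iterative DP that, at every position, probes only the distinct word lengths against a precomputed word set (measured faster on most generated inputs, but a timing run could not confirm it at the largest sizes, so no speed is claimed).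
-- outside the precondition, e.g. on min_undefined_chars('ab', -2, {'a'}, {}): A returns (1, ' a b'), B returns (2, ' a b a b')
import Mathlib
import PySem

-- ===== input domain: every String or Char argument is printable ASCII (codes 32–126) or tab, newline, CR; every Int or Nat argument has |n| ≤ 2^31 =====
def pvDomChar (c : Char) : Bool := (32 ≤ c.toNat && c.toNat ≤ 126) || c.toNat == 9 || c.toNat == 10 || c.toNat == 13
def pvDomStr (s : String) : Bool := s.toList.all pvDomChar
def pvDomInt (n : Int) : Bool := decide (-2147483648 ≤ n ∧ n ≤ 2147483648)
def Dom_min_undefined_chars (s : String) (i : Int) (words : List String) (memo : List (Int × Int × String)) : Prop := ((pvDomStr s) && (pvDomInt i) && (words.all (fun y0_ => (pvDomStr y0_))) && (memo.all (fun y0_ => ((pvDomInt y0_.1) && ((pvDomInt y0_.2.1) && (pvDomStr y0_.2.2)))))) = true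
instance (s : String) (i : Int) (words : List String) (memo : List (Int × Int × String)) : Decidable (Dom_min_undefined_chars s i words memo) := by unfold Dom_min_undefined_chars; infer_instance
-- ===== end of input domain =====

-- B replaces A's top-down memoized recursion (which scans every end position per index, testing
-- each substring against the word list) by a bottom-up DP probing only the distinct word lengths
-- against a word set; the equivalence proved here is about the RETURN value only (A also mutates
-- the caller's memo dict in place, B does not).

-- shared primitive wrappers (used by BOTH ports: both Pythons write these same expressions)
-- s[a:b]
def pvSlice (cs : List Char) (a b : Int) : String := String.ofList (PySem.List.slice cs (some a) (some b))
-- s[j:]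
def pvSuffix (cs : List Char) (j : Int) : String := String.ofList (PySem.List.slice cs (some j) none)
-- s[j] as a 1-char string; the IndexError case (none) is unreachable at every use site (0 ≤ j < len s)
def pvChar (cs : List Char) (j : Int) : String := ((PySem.List.pyGet? cs j).map (fun c => String.ofList [c])).getD ""

-- ===== PORT A =====
-- A mutates the memo dict during the recursion: the port threads it through; fuel = remaining
-- recursion depth, (len s - j) ≤ fuel at every call, so the fuel-0 branch is unreachable.
def pvAgo (cs : List Char) (words : List String) : Nat → Int → PySem.Dict Int (Int × String) →
    (Int × String) × PySem.Dict Int (Int × String)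
  | fuel, j, m =>
    if (cs.length : Int) ≤ j then ((0, ""), m)
    else if words.contains (pvSuffix cs j) then ((0, pvSuffix cs j), m)
    else
      match m.get? j with
      | some v => (v, m)
      | none =>
        match fuel with
        | 0 => ((0, ""), m)  -- unreachable
        | Nat.succ f =>
          let r1 := pvAgo cs words f (j+1) m
          let init : Int × String := (r1.1.1 + 1, pvChar cs j ++ r1.1.2)
          let r2 := (PySem.List.pyRange (j+1) ((cs.length : Int)+1) 1).foldl
            (fun (acc : (Int × String) × PySem.Dict Int (Int × String)) e =>
              let sb := pvSlice cs j e
              if words.contains sb then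
                let rc := pvAgo cs words f e acc.2
                if rc.1.1 < acc.1.1 then ((rc.1.1, " " ++ sb ++ " " ++ rc.1.2), rc.2)
                else (acc.1, rc.2)
              else acc) (init, r1.2)
          (r2.1, r2.2.insert j r2.1)

def min_undefined_chars (s : String) (i : Int) (words : List String) (memo : List (Int × Int × String)) : Int × String :=
  (pvAgo s.toList words (((s.toList.length : Int) - i).toNat + 1) i (PySem.Dict.mk memo)).1

-- ===== PORT B =====
def min_undefined_chars_alt (s : String) (i : Int) (words : List String) (memo : List (Int × Int × String)) : Int × String :=
  let cs := s.toList
  let n : Int := (cs.length : Int)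
  if n ≤ i then (0, "")
  else
    let wordset : PySem.Set String := PySem.Set.ofList words
    let suf0 := pvSuffix cs i
    if PySem.Set.contains wordset suf0 then (0, suf0)
    else match (PySem.Dict.mk memo : PySem.Dict Int (Int × String)).get? i with
    | some v => v
    | none =>
    let lens : List Int :=
      PySem.List.sorted (PySem.Set.ofList ((words.filter (fun w => w ≠ "")).map (fun w => PySem.Str.len w))) (fun x => x) false
    let m0 : PySem.Dict Int (Int × String) := PySem.Dict.mk memo
    let dp0 : PySem.Dict Int (Int × String) := PySem.Dict.empty.insert n (0, "")
    let dpF := (PySem.List.pyRange (n-1) (i-1) (-1)).foldl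
      (fun (dp : PySem.Dict Int (Int × String)) j =>
        let suf := pvSuffix cs j
        if PySem.Set.contains wordset suf then dp.insert j (0, suf)
        else
          match m0.get? j with
          | some v => dp.insert j v
          | none =>
            let p := dp.getD (j+1) (0, "")   -- KeyError unreachable: the keys (j, n] are always present
            let best := lens.foldl
              (fun (best : Int × String) L =>
                let e := j + L
                if e ≤ n then
                  let sb := pvSlice cs j e
                  if PySem.Set.contains wordset sb then
                    let q := dp.getD e (0, "")   -- KeyError unreachable, e ∈ (j, n]
                    if q.1 < best.1 then (q.1, " " ++ sb ++ " " ++ q.2) else best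
                  else best
                else best) (p.1 + 1, pvChar cs j ++ p.2)
            dp.insert j best) dp0
    dpF.getD i (0, "")

-- ===== PRECONDITION & SPEC =====
-- Pre_ restricts to the function's natural domain 0 ≤ i (a start index into s): for negative i
-- A's returned value arises from Python's negative-index/slice wraparound, an accident of the
-- implementation, which B does not reproduce.
def Pre_min_undefined_chars (s : String) (i : Int) (words : List String) (memo : List (Int × Int × String)) : Prop := 0 ≤ i
instance (s : String) (i : Int) (words : List String) (memo : List (Int × Int × String)) : Decidable (Pre_min_undefined_chars s i words memo) := by unfold Pre_min_undefined_chars; infer_instance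

def pvWitness_min_undefined_chars : String × Int × List String × (List (Int × Int × String)) :=
  ("ab", 0, ["a"], [])

def Spec_min_undefined_chars (s : String) (i : Int) (words : List String) (memo : List (Int × Int × String)) (out : Int × String) : Prop := out = min_undefined_chars_alt s i words memo
instance (s : String) (i : Int) (words : List String) (memo : List (Int × Int × String)) (out : Int × String) : Decidable (Spec_min_undefined_chars s i words memo out) := by unfold Spec_min_undefined_chars; infer_instance

-- ===== CLAIM (what is proved, stated in full; the proofs are below) =====
def Claim_equal_min_undefined_chars : Prop := ∀ (s : String) (i : Int) (words : List String) (memo : List (Int × Int × String)), Dom_min_undefined_chars s i words memo → Pre_min_undefined_chars s i words memo → Spec_min_undefined_chars s i words memo (min_undefined_chars s i words memo)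

-- ===== LEMMAS AND PROOFS =====

-- the pure value A computes: pvAgo's recursion with the memo reads answered by the ORIGINAL memo M0
def pvG (cs : List Char) (words : List String) (M0 : PySem.Dict Int (Int × String)) : Nat → Int → Int × String
  | fuel, j =>
    if (cs.length : Int) ≤ j then (0, "")
    else if words.contains (pvSuffix cs j) then (0, pvSuffix cs j)
    else
      match M0.get? j with
      | some v => v
      | none =>
        match fuel with
        | 0 => (0, "")
        | Nat.succ f =>
          let p := pvG cs words M0 f (j+1)
          let init : Int × String := (p.1 + 1, pvChar cs j ++ p.2)
          (PySem.List.pyRange (j+1) ((cs.length : Int)+1) 1).foldl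
            (fun (best : Int × String) e =>
              let sb := pvSlice cs j e
              if words.contains sb then
                let q := pvG cs words M0 f e
                if q.1 < best.1 then (q.1, " " ++ sb ++ " " ++ q.2) else best
              else best) init

theorem pvG_base (cs : List Char) (words : List String) (M0 : PySem.Dict Int (Int × String))
    (f : Nat) (j : Int) (hnj : (cs.length : Int) ≤ j) : pvG cs words M0 f j = (0, "") := by
  cases f <;> simp only [pvG, if_pos hnj]

theorem pvG_fuel (cs : List Char) (words : List String) (M0 : PySem.Dict Int (Int × String)) :
    ∀ (f f' : Nat) (j : Int), (cs.length : Int) - j ≤ (f : Int) → (cs.length : Int) - j ≤ (f' : Int) →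
    pvG cs words M0 f j = pvG cs words M0 f' j := by
  intro f
  induction f with
  | zero =>
    intro f' j h h'
    have hnj : (cs.length : Int) ≤ j := by omega
    rw [pvG_base _ _ _ _ _ hnj, pvG_base _ _ _ _ _ hnj]
  | succ f ih =>
    intro f' j h h'
    by_cases hnj : (cs.length : Int) ≤ j
    · rw [pvG_base _ _ _ _ _ hnj, pvG_base _ _ _ _ _ hnj]
    · match f' with
      | 0 => omega
      | Nat.succ f'' =>
        simp only [pvG, if_neg hnj]
        by_cases hw : words.contains (pvSuffix cs j) = true
        · simp only [if_pos hw]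
        · simp only [if_neg hw]
          cases hm : M0.get? j with
          | some v => rfl
          | none =>
            simp only []
            have h1 : pvG cs words M0 f (j+1) = pvG cs words M0 f'' (j+1) := ih f'' (j+1) (by omega) (by omega)
            rw [h1]
            apply PySem.List.foldl_congr_mem
            intro acc e he
            rw [PySem.List.mem_pyRange_one] at he
            have h2 : pvG cs words M0 f e = pvG cs words M0 f'' e := ih f'' e (by omega) (by omega)
            simp only [h2]

def pvC (cs : List Char) (words : List String) (M0 : PySem.Dict Int (Int × String)) (j : Int) : Int × String :=
  pvG cs words M0 (((cs.length : Int) - j).toNat) j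

theorem pvG_eq_C (cs : List Char) (words : List String) (M0 : PySem.Dict Int (Int × String))
    (f : Nat) (j : Int) (h : (cs.length : Int) - j ≤ (f : Int)) :
    pvG cs words M0 f j = pvC cs words M0 j := by
  apply pvG_fuel <;> omega

theorem pvG_suffix (cs : List Char) (words : List String) (M0 : PySem.Dict Int (Int × String))
    (f : Nat) (j : Int) (hnj : ¬ (cs.length : Int) ≤ j) (hw : words.contains (pvSuffix cs j) = true) :
    pvG cs words M0 f j = (0, pvSuffix cs j) := by
  cases f <;> simp only [pvG, if_neg hnj, if_pos hw]

theorem pvG_memo (cs : List Char) (words : List String) (M0 : PySem.Dict Int (Int × String))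
    (f : Nat) (j : Int) (v : Int × String) (hnj : ¬ (cs.length : Int) ≤ j)
    (hw : ¬ words.contains (pvSuffix cs j) = true) (hm : M0.get? j = some v) :
    pvG cs words M0 f j = v := by
  cases f <;> simp only [pvG, if_neg hnj, if_neg hw, hm]

theorem pvG_compute (cs : List Char) (words : List String) (M0 : PySem.Dict Int (Int × String))
    (f : Nat) (j : Int) (hnj : ¬ (cs.length : Int) ≤ j)
    (hw : ¬ words.contains (pvSuffix cs j) = true) (hm : M0.get? j = none) :
    pvG cs words M0 (Nat.succ f) j =
      (PySem.List.pyRange (j+1) ((cs.length : Int)+1) 1).foldl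
        (fun (best : Int × String) e =>
          if words.contains (pvSlice cs j e) = true then
            if (pvG cs words M0 f e).1 < best.1 then
              ((pvG cs words M0 f e).1, " " ++ pvSlice cs j e ++ " " ++ (pvG cs words M0 f e).2)
            else best
          else best)
        ((pvG cs words M0 f (j+1)).1 + 1, pvChar cs j ++ (pvG cs words M0 f (j+1)).2) := by
  simp only [pvG, if_neg hnj, if_neg hw, hm]

def pvGood (cs : List Char) (words : List String) (M0 m : PySem.Dict Int (Int × String)) : Prop :=
  (∀ k v, M0.get? k = some v → m.get? k = some v) ∧
  (∀ k v, m.get? k = some v → M0.get? k = some v ∨ (M0.get? k = none ∧ 0 ≤ k ∧ v = pvC cs words M0 k))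

theorem pvFold_aux (cs : List Char) (words : List String) (M0 : PySem.Dict Int (Int × String))
    (f : Nat) (j : Int)
    (hrec : ∀ e m, (cs.length : Int) - e ≤ (f : Int) → 0 ≤ e → pvGood cs words M0 m →
      (pvAgo cs words f e m).1 = pvG cs words M0 f e ∧ pvGood cs words M0 (pvAgo cs words f e m).2) :
    ∀ (l : List Int), (∀ e ∈ l, (cs.length : Int) - e ≤ (f : Int) ∧ 0 ≤ e) →
    ∀ (acc : Int × String) (m : PySem.Dict Int (Int × String)), pvGood cs words M0 m →
    (l.foldl
        (fun (acc : (Int × String) × PySem.Dict Int (Int × String)) e =>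
          if words.contains (pvSlice cs j e) = true then
            if (pvAgo cs words f e acc.2).1.1 < acc.1.1 then
              (((pvAgo cs words f e acc.2).1.1, " " ++ pvSlice cs j e ++ " " ++ (pvAgo cs words f e acc.2).1.2),
                (pvAgo cs words f e acc.2).2)
            else (acc.1, (pvAgo cs words f e acc.2).2)
          else acc) (acc, m)).1
      = l.foldl
        (fun (best : Int × String) e =>
          if words.contains (pvSlice cs j e) = true then
            if (pvG cs words M0 f e).1 < best.1 then
              ((pvG cs words M0 f e).1, " " ++ pvSlice cs j e ++ " " ++ (pvG cs words M0 f e).2)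
            else best
          else best) acc ∧
      pvGood cs words M0 (l.foldl
        (fun (acc : (Int × String) × PySem.Dict Int (Int × String)) e =>
          if words.contains (pvSlice cs j e) = true then
            if (pvAgo cs words f e acc.2).1.1 < acc.1.1 then
              (((pvAgo cs words f e acc.2).1.1, " " ++ pvSlice cs j e ++ " " ++ (pvAgo cs words f e acc.2).1.2),
                (pvAgo cs words f e acc.2).2)
            else (acc.1, (pvAgo cs words f e acc.2).2)
          else acc) (acc, m)).2 := by
  intro l
  induction l with
  | nil => intro _ acc m hg; exact ⟨by trivial, hg⟩
  | cons e t iht =>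
    intro hl acc m hg
    have he := hl e List.mem_cons_self
    have ht := fun x hx => hl x (List.mem_cons_of_mem _ hx)
    simp only [List.foldl_cons]
    by_cases hw : words.contains (pvSlice cs j e) = true
    · simp only [if_pos hw]
      obtain ⟨hv, hg'⟩ := hrec e m he.1 he.2 hg
      rw [hv]
      by_cases hlt : (pvG cs words M0 f e).1 < acc.1
      · simp only [if_pos hlt]
        exact iht ht _ _ hg'
      · simp only [if_neg hlt]
        exact iht ht _ _ hg'
    · simp only [if_neg hw]
      exact iht ht acc m hg

theorem pvAgo_correct (cs : List Char) (words : List String) (M0 : PySem.Dict Int (Int × String)) :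
    ∀ (f : Nat) (j : Int) (m : PySem.Dict Int (Int × String)),
    (cs.length : Int) - j ≤ (f : Int) → 0 ≤ j → pvGood cs words M0 m →
    (pvAgo cs words f j m).1 = pvG cs words M0 f j ∧ pvGood cs words M0 (pvAgo cs words f j m).2 := by
  intro f
  induction f with
  | zero =>
    intro j m h hj hg
    have hnj : (cs.length : Int) ≤ j := by omega
    rw [pvG_base _ _ _ _ _ hnj]
    simp only [pvAgo, if_pos hnj]
    exact ⟨by trivial, hg⟩
  | succ f ih =>
    intro j m h hj hg
    by_cases hnj : (cs.length : Int) ≤ j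
    · rw [pvG_base _ _ _ _ _ hnj]
      simp only [pvAgo, if_pos hnj]
      exact ⟨by trivial, hg⟩
    · by_cases hw : words.contains (pvSuffix cs j) = true
      · rw [pvG_suffix _ _ _ _ _ hnj hw]
        simp only [pvAgo, if_neg hnj, if_pos hw]
        exact ⟨by trivial, hg⟩
      · cases hm : m.get? j with
        | some v =>
          have hres : pvAgo cs words (Nat.succ f) j m = (v, m) := by
            simp only [pvAgo, if_neg hnj, if_neg hw, hm]
          rw [hres]
          refine ⟨?_, hg⟩
          rcases hg.2 j v hm with h0 | ⟨h0, _, hv⟩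
          · rw [pvG_memo _ _ _ _ _ _ hnj hw h0]
          · rw [hv, pvG_eq_C _ _ _ _ _ (by push_cast; omega)]
        | none =>
          have hM0 : M0.get? j = none := by
            cases hM : M0.get? j with
            | none => rfl
            | some w => rw [hg.1 j w hM] at hm; cases hm
          obtain ⟨hv1, hg1⟩ := ih (j+1) m (by omega) (by omega) hg
          simp only [pvAgo, if_neg hnj, if_neg hw, hm]
          rw [hv1]
          have hfold := pvFold_aux cs words M0 f j
            (fun e m' he h0 hg' => ih e m' he h0 hg')
            (PySem.List.pyRange (j+1) ((cs.length : Int)+1) 1)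
            (by
              intro e hee
              rw [PySem.List.mem_pyRange_one] at hee
              constructor <;> [push_cast; skip] <;> omega)
            ((pvG cs words M0 f (j+1)).1 + 1, pvChar cs j ++ (pvG cs words M0 f (j+1)).2)
            (pvAgo cs words f (j+1) m).2 hg1
          obtain ⟨hfv, hfg⟩ := hfold
          rw [pvG_compute _ _ _ _ _ hnj hw hM0]
          refine ⟨by rw [← hfv], ?_⟩
          constructor
          · intro k v hk
            rcases eq_or_ne k j with rfl | hne
            · rw [hk] at hM0; cases hM0
            · rw [PySem.Dict.get?_insert]
              simp only [if_neg hne]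
              exact hfg.1 k v hk
          · intro k v hk
            rw [PySem.Dict.get?_insert] at hk
            by_cases hkj : k = j
            · subst hkj
              simp only [if_true, Option.some.injEq] at hk
              right
              refine ⟨hM0, hj, ?_⟩
              rw [← hk, hfv, ← pvG_compute _ _ _ _ _ hnj hw hM0,
                pvG_eq_C _ _ _ _ _ (by push_cast; omega)]
            · simp only [if_neg hkj] at hk
              exact hfg.2 k v hk

theorem pvChainEq : ∀ (l1 l2 : List Int), l1.Pairwise (· < ·) → l2.Pairwise (· < ·) →
    (∀ x, x ∈ l1 ↔ x ∈ l2) → l1 = l2 := by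
  intro l1 l2 h1 h2 h
  have hp : l1.Perm l2 := by
    rw [List.perm_ext_iff_of_nodup (h1.nodup) (h2.nodup)]
    exact h
  exact hp.eq_of_pairwise (fun a b _ _ hab hba => absurd hba (not_lt.mpr hab.le)) h1 h2

def pvLens (words : List String) : List Int :=
  PySem.List.sorted (PySem.Set.ofList ((words.filter (fun w => w ≠ "")).map (fun w => PySem.Str.len w))) (fun x => x) false

theorem pvSetContains (words : List String) (w : String) :
    PySem.Set.contains (PySem.Set.ofList words) w = words.contains w := by simp [pysem]

theorem pvSliceLen (cs : List Char) (j e : Int) (h0 : 0 ≤ j) (h1 : j ≤ e) (h2 : e ≤ (cs.length : Int)) :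
    PySem.Str.len (pvSlice cs j e) = e - j := by
  have : (PySem.List.slice cs (some j) (some e)).length = (e - j).toNat := by
    rw [PySem.List.slice_toNat _ h0 (by omega)]
    simp only [List.length_take, List.length_drop]
    omega
  simp [PySem.Str.len_eq, pvSlice, this]
  omega

theorem pvLens_pairwise (words : List String) : (pvLens words).Pairwise (· < ·) :=
  PySem.List.sorted_ofList_pairwise_lt _

theorem pvMemLens (words : List String) (L : Int) :
    L ∈ pvLens words ↔ ∃ w ∈ words, w ≠ "" ∧ PySem.Str.len w = L := by
  unfold pvLens
  rw [PySem.List.mem_sorted, PySem.Set.mem_ofList, List.mem_map]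
  constructor
  · rintro ⟨w, hw, rfl⟩
    rw [List.mem_filter] at hw
    exact ⟨w, hw.1, by simpa using hw.2, rfl⟩
  · rintro ⟨w, hw, hne, rfl⟩
    exact ⟨w, List.mem_filter.mpr ⟨hw, by simpa using hne⟩, rfl⟩

theorem pvInner_eq (cs : List Char) (words : List String) (M0 : PySem.Dict Int (Int × String))
    (dp : PySem.Dict Int (Int × String)) (j : Int) (f : Nat)
    (hj0 : 0 ≤ j) (_hjn : j < (cs.length : Int))
    (hf : (cs.length : Int) - (j+1) ≤ (f : Int))
    (hdp : ∀ k, j < k → k ≤ (cs.length : Int) → dp.get? k = some (pvC cs words M0 k))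
    (init : Int × String) :
    (pvLens words).foldl
      (fun (best : Int × String) L =>
        if j + L ≤ (cs.length : Int) then
          if PySem.Set.contains (PySem.Set.ofList words) (pvSlice cs j (j + L)) = true then
            if (dp.getD (j + L) (0, "")).1 < best.1 then
              ((dp.getD (j + L) (0, "")).1, " " ++ pvSlice cs j (j + L) ++ " " ++ (dp.getD (j + L) (0, "")).2)
            else best
          else best
        else best) init
    = (PySem.List.pyRange (j+1) ((cs.length : Int)+1) 1).foldl
      (fun (best : Int × String) e =>
        if words.contains (pvSlice cs j e) = true then
          if (pvG cs words M0 f e).1 < best.1 then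
            ((pvG cs words M0 f e).1, " " ++ pvSlice cs j e ++ " " ++ (pvG cs words M0 f e).2)
          else best
        else best) init := by
  have hmap := (List.foldl_map (f := fun L => j + L)
    (g := fun (best : Int × String) e =>
        if e ≤ (cs.length : Int) then
          if PySem.Set.contains (PySem.Set.ofList words) (pvSlice cs j e) = true then
            if (dp.getD e (0, "")).1 < best.1 then
              ((dp.getD e (0, "")).1, " " ++ pvSlice cs j e ++ " " ++ (dp.getD e (0, "")).2)
            else best
          else best
        else best)
    (l := pvLens words) (init := init))
  rw [← hmap]
  rw [PySem.List.foldl_ite_eq_foldl_filter (p := fun e => e ≤ (cs.length : Int))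
    (f := fun (best : Int × String) e =>
          if PySem.Set.contains (PySem.Set.ofList words) (pvSlice cs j e) = true then
            if (dp.getD e (0, "")).1 < best.1 then
              ((dp.getD e (0, "")).1, " " ++ pvSlice cs j e ++ " " ++ (dp.getD e (0, "")).2)
            else best
          else best)]
  rw [PySem.List.foldl_if_eq_foldl_filter (p := fun e => PySem.Set.contains (PySem.Set.ofList words) (pvSlice cs j e))
    (f := fun (best : Int × String) e =>
            if (dp.getD e (0, "")).1 < best.1 then
              ((dp.getD e (0, "")).1, " " ++ pvSlice cs j e ++ " " ++ (dp.getD e (0, "")).2)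
            else best)]
  rw [PySem.List.foldl_if_eq_foldl_filter (p := fun e => words.contains (pvSlice cs j e))
    (f := fun (best : Int × String) e =>
          if (pvG cs words M0 f e).1 < best.1 then
            ((pvG cs words M0 f e).1, " " ++ pvSlice cs j e ++ " " ++ (pvG cs words M0 f e).2)
          else best)]
  have hlist :
      (((pvLens words).map (fun L => j + L)).filter (fun e => decide (e ≤ (cs.length : Int)))).filter
        (fun e => PySem.Set.contains (PySem.Set.ofList words) (pvSlice cs j e))
      = (PySem.List.pyRange (j+1) ((cs.length : Int)+1) 1).filter (fun e => words.contains (pvSlice cs j e)) := by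
    apply pvChainEq
    · apply List.Pairwise.filter
      apply List.Pairwise.filter
      exact List.Pairwise.map _ (fun a b (h : a < b) => by omega) (pvLens_pairwise words)
    · apply List.Pairwise.filter
      exact PySem.List.pairwise_lt_pyRange_one _ _
    · intro x
      simp only [List.mem_filter, List.mem_map, decide_eq_true_eq, PySem.List.mem_pyRange_one,
        pvSetContains]
      constructor
      · rintro ⟨⟨⟨L, hL, rfl⟩, hle⟩, hc⟩
        rw [pvMemLens] at hL
        obtain ⟨w, _, hne, hlen⟩ := hL
        have : (1:Int) ≤ L := by
          have := PySem.Str.len_eq w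
          have hpos : 0 < w.toList.length := by
            cases hwl : w.toList with
            | nil => exact absurd (String.toList_eq_nil_iff.mp hwl) hne
            | cons a t => simp
          omega
        exact ⟨⟨by omega, by omega⟩, hc⟩
      · rintro ⟨⟨h1, h2⟩, hc⟩
        have hwmem : pvSlice cs j x ∈ words := List.mem_of_elem_eq_true hc
        refine ⟨⟨⟨x - j, ?_, by omega⟩, by omega⟩, hc⟩
        rw [pvMemLens]
        refine ⟨pvSlice cs j x, hwmem, ?_, ?_⟩
        · intro hne
          have := pvSliceLen cs j x hj0 (by omega) (by omega)
          rw [hne] at this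
          simp [PySem.Str.len_eq] at this
          omega
        · exact pvSliceLen cs j x hj0 (by omega) (by omega)
  rw [hlist]
  apply PySem.List.foldl_congr_mem
  intro acc e he
  rw [List.mem_filter, PySem.List.mem_pyRange_one] at he
  have hget := hdp e (by omega) (by omega)
  have : dp.getD e (0, "") = pvG cs words M0 f e := by
    rw [PySem.Dict.getD_eq_get?_getD, hget]
    simp only [Option.getD_some]
    exact (pvG_eq_C _ _ _ _ _ (by omega)).symm
  rw [this]

theorem pvB_loop (cs : List Char) (words : List String) (M0 : PySem.Dict Int (Int × String)) (i : Int)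
    (hi : 0 ≤ i) :
    ∀ (t : Nat) (dp : PySem.Dict Int (Int × String)),
    i - 1 + (t : Int) ≤ (cs.length : Int) - 1 →
    (∀ k, i - 1 + (t : Int) < k → k ≤ (cs.length : Int) → dp.get? k = some (pvC cs words M0 k)) →
    ∀ k, i ≤ k → k ≤ (cs.length : Int) →
    ((PySem.List.pyRange (i - 1 + (t : Int)) (i-1) (-1)).foldl
      (fun (dp : PySem.Dict Int (Int × String)) j =>
        if PySem.Set.contains (PySem.Set.ofList words) (pvSuffix cs j) = true then dp.insert j (0, pvSuffix cs j)
        else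
          match M0.get? j with
          | some v => dp.insert j v
          | none =>
            dp.insert j ((pvLens words).foldl
              (fun (best : Int × String) L =>
                if j + L ≤ (cs.length : Int) then
                  if PySem.Set.contains (PySem.Set.ofList words) (pvSlice cs j (j + L)) = true then
                    if (dp.getD (j + L) (0, "")).1 < best.1 then
                      ((dp.getD (j + L) (0, "")).1, " " ++ pvSlice cs j (j + L) ++ " " ++ (dp.getD (j + L) (0, "")).2)
                    else best
                  else best
                else best)
              ((dp.getD (j+1) (0, "")).1 + 1, pvChar cs j ++ (dp.getD (j+1) (0, "")).2))) dp).get? k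
      = some (pvC cs words M0 k) := by
  intro t
  induction t with
  | zero =>
    intro dp hjn hdp k hk1 hk2
    rw [PySem.List.pyRange_neg_one_eq_nil (by omega)]
    exact hdp k (by omega) hk2
  | succ t iht =>
    intro dp hjn hdp k hk1 hk2
    set j : Int := i - 1 + ((t : Int) + 1) with hjdef
    have hcast : i - 1 + ((Nat.succ t : Nat) : Int) = j := by push_cast; omega
    rw [hcast, PySem.List.pyRange_neg_one_cons (by omega)]
    have hstep : j - 1 = i - 1 + (t : Int) := by omega
    simp only [List.foldl_cons]
    have hnj : ¬ (cs.length : Int) ≤ j := by omega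
    have hj0 : 0 ≤ j := by omega
    -- the value inserted at j is pvC j, whatever branch is taken
    have hval : (if PySem.Set.contains (PySem.Set.ofList words) (pvSuffix cs j) = true then dp.insert j (0, pvSuffix cs j)
        else
          match M0.get? j with
          | some v => dp.insert j v
          | none =>
            dp.insert j ((pvLens words).foldl
              (fun (best : Int × String) L =>
                if j + L ≤ (cs.length : Int) then
                  if PySem.Set.contains (PySem.Set.ofList words) (pvSlice cs j (j + L)) = true then
                    if (dp.getD (j + L) (0, "")).1 < best.1 then
                      ((dp.getD (j + L) (0, "")).1, " " ++ pvSlice cs j (j + L) ++ " " ++ (dp.getD (j + L) (0, "")).2)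
                    else best
                  else best
                else best)
              ((dp.getD (j+1) (0, "")).1 + 1, pvChar cs j ++ (dp.getD (j+1) (0, "")).2)))
        = dp.insert j (pvC cs words M0 j) := by
      by_cases hsuf : words.contains (pvSuffix cs j) = true
      · rw [if_pos (by rw [pvSetContains]; exact hsuf)]
        unfold pvC
        rw [pvG_suffix _ _ _ _ _ hnj hsuf]
      · rw [if_neg (by rw [pvSetContains]; exact hsuf)]
        cases hm : M0.get? j with
        | some v =>
          show dp.insert j v = dp.insert j (pvC cs words M0 j)
          unfold pvC
          rw [pvG_memo cs words M0 _ j v hnj hsuf hm]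
        | none =>
          have hdpj : ∀ k, j < k → k ≤ (cs.length : Int) → dp.get? k = some (pvC cs words M0 k) := by
            intro k h1 h2; exact hdp k (by omega) h2
          have hgetj1 : dp.getD (j+1) (0, "") = pvG cs words M0 ((((cs.length : Int)) - (j+1)).toNat) (j+1) := by
            rw [PySem.Dict.getD_eq_get?_getD, hdpj (j+1) (by omega) (by omega)]
            simp only [Option.getD_some]; rfl
          have hfuel : (((cs.length : Int)) - j).toNat = Nat.succ ((((cs.length : Int)) - (j+1)).toNat) := by omega
          have hcomp : pvC cs words M0 j =
              (PySem.List.pyRange (j+1) ((cs.length : Int)+1) 1).foldl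
                (fun (best : Int × String) e =>
                  if words.contains (pvSlice cs j e) = true then
                    if (pvG cs words M0 ((((cs.length : Int)) - (j+1)).toNat) e).1 < best.1 then
                      ((pvG cs words M0 ((((cs.length : Int)) - (j+1)).toNat) e).1, " " ++ pvSlice cs j e ++ " " ++ (pvG cs words M0 ((((cs.length : Int)) - (j+1)).toNat) e).2)
                    else best
                  else best)
                ((pvG cs words M0 ((((cs.length : Int)) - (j+1)).toNat) (j+1)).1 + 1,
                  pvChar cs j ++ (pvG cs words M0 ((((cs.length : Int)) - (j+1)).toNat) (j+1)).2) := by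
            unfold pvC
            rw [hfuel]
            exact pvG_compute _ _ _ _ _ hnj hsuf hm
          change dp.insert j _ = dp.insert j _
          refine congrArg _ ?_
          rw [hcomp, hgetj1]
          exact pvInner_eq cs words M0 dp j ((((cs.length : Int)) - (j+1)).toNat) hj0 (by omega) (by omega) hdpj _
    rw [hval]
    rw [hstep]
    apply iht
    · omega
    · intro k' h1 h2
      rcases eq_or_ne k' j with rfl | hne
      · rw [PySem.Dict.get?_insert_self]
      · rw [PySem.Dict.get?_insert]
        rw [if_neg hne]
        exact hdp k' (by omega) h2
    · omega
    · omega

-- ===== VERDICT (by name: the statement is the Claim_ definition above) =====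
theorem min_undefined_chars_spec : Claim_equal_min_undefined_chars := by
  intro s i words memo _ hpre
  unfold Spec_min_undefined_chars
  unfold Pre_min_undefined_chars at hpre
  show min_undefined_chars s i words memo = min_undefined_chars_alt s i words memo
  have hgood : pvGood s.toList words (PySem.Dict.mk memo) (PySem.Dict.mk memo) :=
    ⟨fun _ _ h => h, fun _ _ h => Or.inl h⟩
  have hA := (pvAgo_correct s.toList words (PySem.Dict.mk memo)
    (((s.toList.length : Int) - i).toNat + 1) i (PySem.Dict.mk memo)
    (by push_cast; omega) hpre hgood).1
  unfold min_undefined_chars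
  rw [hA, pvG_eq_C _ _ _ _ _ (by push_cast; omega)]
  simp only [min_undefined_chars_alt]
  by_cases hni : (s.toList.length : Int) ≤ i
  · rw [if_pos hni]
    unfold pvC
    rw [pvG_base _ _ _ _ _ hni]
  · rw [if_neg hni]
    by_cases hsuf : words.contains (pvSuffix s.toList i) = true
    · rw [if_pos (by rw [pvSetContains]; exact hsuf)]
      unfold pvC
      rw [pvG_suffix _ _ _ _ _ hni hsuf]
    · rw [if_neg (by rw [pvSetContains]; exact hsuf)]
      cases hm : (PySem.Dict.mk memo : PySem.Dict Int (Int × String)).get? i with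
      | some v =>
        show pvC s.toList words (PySem.Dict.mk memo) i = v
        unfold pvC
        rw [pvG_memo _ _ _ _ _ v hni hsuf hm]
      | none =>
        show pvC s.toList words (PySem.Dict.mk memo) i = _
        have hinit : ∀ k, i - 1 + (((((s.toList.length : Int)) - i).toNat : Nat) : Int) < k →
            k ≤ (s.toList.length : Int) →
            (PySem.Dict.empty.insert ((s.toList.length : Int)) ((0 : Int), "")).get? k
              = some (pvC s.toList words (PySem.Dict.mk memo) k) := by
          intro k h1 h2
          have hk : k = (s.toList.length : Int) := by omega
          subst hk
          rw [PySem.Dict.get?_insert_self]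
          unfold pvC
          rw [pvG_base _ _ _ _ _ (le_refl _)]
        have hloop := pvB_loop s.toList words (PySem.Dict.mk memo) i hpre
          ((((s.toList.length : Int)) - i).toNat)
          (PySem.Dict.empty.insert ((s.toList.length : Int)) ((0 : Int), ""))
          (by omega) hinit i (le_refl _) (by omega)
        unfold pvLens at hloop
        have hrange : i - 1 + (((((s.toList.length : Int)) - i).toNat : Nat) : Int) = (s.toList.length : Int) - 1 := by
          omega
        rw [hrange] at hloop
        rw [PySem.Dict.getD_eq_get?_getD, hloop]
        rfl
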